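-- pv_equiv track=rewrite | github.com/ngovu123/vietsub | content_extractor.py | extract_contents_from_text
-- ===== SOURCE A (Python) =====
-- def extract_contents_from_text(text: str) -> list[list[str]]:
--     """
--     Extracts slide contents from a text input where slides and contents are demarcated by specific markers.
--
--     Args:
--     text (str): The input text containing slide and content markers.
--
--     Returns:
--     list: A list of slides, where each slide is a list of its contents.
--     """
--     lines = text.strip().split('\n')  # Split the input text into lines
--     slides = []  # Initialize a list to hold all slides
--     current_slide = []  # Initialize a list to hold contents of the current slide
--     current_content = ""  # Initialize a string to accumulate the current content
--     recording_content = False  # Flag to indicate if we are recording content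
--
--     for line in lines:
--         line = line.strip()  # Strip any leading/trailing whitespace from the line
--
--         if line.startswith('#Slide:'):
--             if current_slide:
--                 if recording_content:
--                     current_slide.append(current_content.strip())
--                 slides.append(current_slide)
--             current_slide = []
--             current_content = ""
--             recording_content = False
--
--         elif line.startswith('#Content:'):
--             if recording_content:
--                 current_slide.append(current_content.strip())
--             current_content = ""
--             recording_content = True
--
--         elif recording_content:
--             current_content += line + '\n'
--
--     if recording_content:
--         current_slide.append(current_content.strip())
--
--     if current_slide:
--         slides.append(current_slide)
--
--     return slides
-- ===== SOURCE B (Python) =====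
-- def extract_contents_from_text(text: str) -> list[list[str]]:
--     lines = [line.strip() for line in text.strip().split('\n')]
--
--     # Pass 1: partition the lines into slide regions
--     # (each '#Slide:' line closes the current region and opens a new one).
--     regions = [[]]
--     for line in lines:
--         if line.startswith('#Slide:'):
--             regions.append([])
--         else:
--             regions[-1].append(line)
--
--     # Pass 2: within each region, split at '#Content:' markers; lines before
--     # the first marker are ignored; a region with no marker yields no slide.
--     slides = []
--     for region in regions:
--         chunks = []   # completed content chunks (each a list of lines)
--         cur = None    # chunk being collected; None before the first marker
--         for line in region:
--             if line.startswith('#Content:'):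
--                 if cur is not None:
--                     chunks.append(cur)
--                 cur = []
--             elif cur is not None:
--                 cur.append(line)
--         if cur is not None:
--             chunks.append(cur)
--         if chunks:
--             slides.append(['\n'.join(chunk).strip() for chunk in chunks])
--     return slides
-- ===== Notes on version B (the rewrite author's own statement) =====
-- stated objective: alternative
-- what changed: Replaced A's single-pass four-variable state machine (flag, string accumulator, pending slide) by a two-pass decomposition: first partition the stripped lines into slide regions, then split each region at '#Content:' markers and join/strip each chunk, emitting a slide for every region containing a marker.
-- intended difference: On texts where some region delimited by a following '#Slide:' line contains exactly one '#Content:' marker, A silently drops that whole slide (its only content is still pending when the '#Slide:' check 'if current_slide' fails), while B emits the slide with its one content, which is the intended behaviour since the same region at end of text does produce the slide. — e.g. on extract_contents_from_text("#Content:\na\n#Slide:\n#Content:\nb"): A returns [["b"]], B returns [["a"], ["b"]]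
import Mathlib
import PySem

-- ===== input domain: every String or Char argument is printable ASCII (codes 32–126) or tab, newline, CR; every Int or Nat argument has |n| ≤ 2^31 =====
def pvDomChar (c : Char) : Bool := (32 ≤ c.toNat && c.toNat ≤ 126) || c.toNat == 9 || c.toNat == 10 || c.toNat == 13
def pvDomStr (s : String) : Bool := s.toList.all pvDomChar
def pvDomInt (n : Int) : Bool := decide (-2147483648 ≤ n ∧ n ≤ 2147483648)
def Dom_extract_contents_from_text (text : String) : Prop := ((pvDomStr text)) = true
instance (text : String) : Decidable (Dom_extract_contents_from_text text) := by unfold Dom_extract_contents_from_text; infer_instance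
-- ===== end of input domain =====

-- B replaces A's one-pass state machine by a two-pass decomposition (partition into
-- slide regions, then split each region at content markers); B also emits the slide
-- for a region with exactly ONE '#Content:' followed by a '#Slide:' line, which A drops.

-- ===== PORT A =====
-- one loop iteration of A: line is stripped, then the three marker branches in order
def pvStepA (st : List (List String) × List String × String × Bool) (rawline : String) :
    List (List String) × List String × String × Bool :=
  let (slides, cur, cc, recb) := st
  let line := PySem.Str.strip rawline
  if PySem.Str.startswith line "#Slide:" then
    if cur ≠ [] then
      ((slides ++ [if recb then cur ++ [PySem.Str.strip cc] else cur]), [], "", false)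
    else (slides, [], "", false)
  else if PySem.Str.startswith line "#Content:" then
    (slides, (if recb then cur ++ [PySem.Str.strip cc] else cur), "", true)
  else if recb then (slides, cur, cc ++ line ++ "\n", recb)
  else (slides, cur, cc, recb)

def extract_contents_from_text (text : String) : List (List String) :=
  -- text.strip().split('\n'); split? is always `some` for the nonempty separator "\n"
  let lines := (PySem.Str.split? (PySem.Str.strip text) "\n").getD []
  let st := lines.foldl pvStepA ([], [], "", false)
  let (slides, cur, cc, recb) := st
  let cur := if recb then cur ++ [PySem.Str.strip cc] else cur
  if cur ≠ [] then slides ++ [cur] else slides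

-- ===== PORT B =====
-- pass 1: partition lines into slide regions; state = (closed regions, open region)
def pvRegStep (st : List (List String) × List String) (line : String) :
    List (List String) × List String :=
  if PySem.Str.startswith line "#Slide:" then (st.1 ++ [st.2], [])
  else (st.1, st.2 ++ [line])

def pvRegionsB (lines : List String) : List (List String) :=
  let st := lines.foldl pvRegStep ([], [])
  st.1 ++ [st.2]

-- pass 2, inner loop: state = (completed chunks, chunk being collected or none)
def pvChunkStep (st : List (List String) × Option (List String)) (line : String) :
    List (List String) × Option (List String) :=
  if PySem.Str.startswith line "#Content:" then
    ((match st.2 with | some c => st.1 ++ [c] | none => st.1), some [])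
  else match st.2 with
    | some c => (st.1, some (c ++ [line]))
    | none => st

-- the body of B's `for region in regions` loop
def pvSlideOf (region : List String) : Option (List String) :=
  let st := region.foldl pvChunkStep ([], none)
  let chunks := match st.2 with | some c => st.1 ++ [c] | none => st.1
  if chunks ≠ [] then
    some (chunks.map (fun c => PySem.Str.strip (PySem.Str.join "\n" c)))
  else none

def extract_contents_from_text_alt (text : String) : List (List String) :=
  let lines := ((PySem.Str.split? (PySem.Str.strip text) "\n").getD []).map PySem.Str.strip
  (pvRegionsB lines).foldl
    (fun slides region =>
      match pvSlideOf region with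
      | some s => slides ++ [s]
      | none => slides) []

-- ===== PRECONDITION & SPEC =====
-- region splitter used only by D_ (front recursion; independent of the ports)
def pvDRegions : List String → List (List String)
  | [] => [[]]
  | l :: ls =>
    if PySem.Str.startswith l "#Slide:" then [] :: pvDRegions ls
    else
      match pvDRegions ls with
      | r :: rs => (l :: r) :: rs
      | [] => [[l]]

-- A drops every slide whose region (ended by a following '#Slide:' line) contains exactly
-- one '#Content:' marker — the single content is still pending when A tests `if current_slide` —
-- while B emits that slide, as A itself does when the same region ends the text.
def D_extract_contents_from_text (text : String) : Prop :=
  ∃ r ∈ (pvDRegions (((PySem.Str.split? (PySem.Str.strip text) "\n").getD []).map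
      PySem.Str.strip)).dropLast,
    r.countP (fun l => PySem.Str.startswith l "#Content:") = 1

instance (text : String) : Decidable (D_extract_contents_from_text text) := by
  unfold D_extract_contents_from_text; infer_instance

def Spec_extract_contents_from_text (text : String) (out : List (List String)) : Prop :=
  ¬ D_extract_contents_from_text text → out = extract_contents_from_text_alt text
instance (text : String) (out : List (List String)) : Decidable (Spec_extract_contents_from_text text out) := by
  unfold Spec_extract_contents_from_text; infer_instance

def pvDiffWitness_extract_contents_from_text : String := "#Content:\na\n#Slide:\n#Content:\nb"
def pvDiffWitnessOut_extract_contents_from_text : (List (List String)) × (List (List String)) :=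
  ([["b"]], [["a"], ["b"]])

-- ===== CLAIM (what is proved, stated in full; the proofs are below) =====
def Claim_unchanged_extract_contents_from_text : Prop := ∀ (text : String), Dom_extract_contents_from_text text → Spec_extract_contents_from_text text (extract_contents_from_text text)
def Claim_changed_extract_contents_from_text : Prop := Dom_extract_contents_from_text (pvDiffWitness_extract_contents_from_text) ∧ D_extract_contents_from_text (pvDiffWitness_extract_contents_from_text) ∧ extract_contents_from_text (pvDiffWitness_extract_contents_from_text) = pvDiffWitnessOut_extract_contents_from_text.1 ∧ extract_contents_from_text_alt (pvDiffWitness_extract_contents_from_text) = pvDiffWitnessOut_extract_contents_from_text.2 ∧ pvDiffWitnessOut_extract_contents_from_text.1 ≠ pvDiffWitnessOut_extract_contents_from_text.2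
def Claim_exact_extract_contents_from_text : Prop := ∀ (text : String), Dom_extract_contents_from_text text → D_extract_contents_from_text text → extract_contents_from_text text ≠ extract_contents_from_text_alt text

-- ===== LEMMAS AND PROOFS =====

-- strings: A's incremental accumulator, and both formatters
def pvAccum (c : List String) : String := c.foldl (fun cc l => cc ++ l ++ "\n") ""
def pvFmtA (c : List String) : String := PySem.Str.strip (pvAccum c)
def pvFmtB (c : List String) : String := PySem.Str.strip (PySem.Str.join "\n" c)

def pvIsS (l : String) : Bool := PySem.Str.startswith l "#Slide:"
def pvIsC (l : String) : Bool := PySem.Str.startswith l "#Content:"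

-- A's loop state determined by B's chunk state
def pvTriple (st : List (List String) × Option (List String)) : List String × String × Bool :=
  (st.1.map pvFmtA, pvAccum (st.2.getD []), st.2.isSome)

-- A's emissions in terms of a chunk state
def pvMidEmit (st : List (List String) × Option (List String)) : Option (List String) :=
  if st.1 = [] then none
  else some (st.1.map pvFmtA ++ (match st.2 with | some c => [pvFmtA c] | none => []))
def pvFinEmit (st : List (List String) × Option (List String)) : Option (List String) :=
  let cur := st.1.map pvFmtA ++ (match st.2 with | some c => [pvFmtA c] | none => [])
  if cur = [] then none else some cur

def pvFinish (st : List (List String) × List String × String × Bool) : List (List String) :=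
  let (slides, cur, cc, recb) := st
  let cur := if recb then cur ++ [PySem.Str.strip cc] else cur
  if cur ≠ [] then slides ++ [cur] else slides

-- A's output, region by region, starting the head region in chunk state st
def pvEmitAllSt (st : List (List String) × Option (List String)) :
    List (List String) → List (List String)
  | [] => []
  | [r] => (pvFinEmit (r.foldl pvChunkStep st)).toList
  | r :: s :: rs => (pvMidEmit (r.foldl pvChunkStep st)).toList ++ pvEmitAllSt ([], none) (s :: rs)

def pvEmitB (rs : List (List String)) : List (List String) :=
  rs.flatMap (fun r => (pvSlideOf r).toList)

lemma pvAccum_append (c : List String) (l : String) :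
    pvAccum (c ++ [l]) = pvAccum c ++ l ++ "\n" := by
  simp [pvAccum]

@[simp] lemma pvAccum_nil : pvAccum [] = "" := rfl

-- ---------- string lemmas ----------

lemma pv_dropWhile_idem {α : Type} (p : α → Bool) (l : List α) :
    List.dropWhile p (List.dropWhile p l) = List.dropWhile p l := by
  induction l with
  | nil => simp
  | cons a l ih => by_cases h : p a <;> simp [h, ih]

lemma pv_dropWhile_prefix {α : Type} (p : α → Bool) {pre l : List α}
    (hp : pre <+: l) (h : List.dropWhile p l = l) : List.dropWhile p pre = pre := by
  cases pre with
  | nil => simp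
  | cons a as =>
    obtain ⟨t, rfl⟩ := hp
    have hl : List.dropWhile p (a :: (as ++ t)) = a :: (as ++ t) := by simpa using h
    cases hpa : p a with
    | true =>
      exfalso
      simp [hpa] at hl
      have h1 := congrArg List.length hl
      rw [List.length_cons] at h1
      have h2 := List.length_dropWhile_le p (as ++ t)
      omega
    | false => simp [hpa]

lemma pv_rstrip_prefix (l : List Char) : PySem.Chars.rstrip l <+: l := by
  have h := List.dropWhile_suffix (l := l.reverse) PySem.Chars.isspace
  have h2 : (List.dropWhile PySem.Chars.isspace l.reverse).reverse.reverse <:+ l.reverse := by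
    simpa using h
  have := (List.reverse_suffix (l₁ := (List.dropWhile PySem.Chars.isspace l.reverse).reverse)
      (l₂ := l)).mp h2
  simpa [PySem.Chars.rstrip] using this

lemma pv_strip_idem_chars (l : List Char) :
    PySem.Chars.strip (PySem.Chars.strip l) = PySem.Chars.strip l := by
  unfold PySem.Chars.strip
  have h1 : List.dropWhile PySem.Chars.isspace (PySem.Chars.lstrip l) = PySem.Chars.lstrip l := by
    unfold PySem.Chars.lstrip; exact pv_dropWhile_idem _ _
  have h2 : PySem.Chars.lstrip (PySem.Chars.rstrip (PySem.Chars.lstrip l)) =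
      PySem.Chars.rstrip (PySem.Chars.lstrip l) := by
    unfold PySem.Chars.lstrip
    exact pv_dropWhile_prefix _ (pv_rstrip_prefix _) h1
  rw [h2]
  unfold PySem.Chars.rstrip
  simp [pv_dropWhile_idem]

lemma pvStrip_idem (l : String) : PySem.Str.strip (PySem.Str.strip l) = PySem.Str.strip l := by
  simp [PySem.Str.strip, String.toList_ofList, pv_strip_idem_chars]

lemma pv_rstrip_nl (l : List Char) : PySem.Chars.rstrip (l ++ ['\n']) = PySem.Chars.rstrip l := by
  simp [PySem.Chars.rstrip, List.reverse_append,
    show PySem.Chars.isspace '\n' = true from by decide]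

lemma pv_strip_nl (l : List Char) : PySem.Chars.strip (l ++ ['\n']) = PySem.Chars.strip l := by
  unfold PySem.Chars.strip PySem.Chars.lstrip
  rw [List.dropWhile_append]
  by_cases hemp : (List.dropWhile PySem.Chars.isspace l).isEmpty = true
  · rw [if_pos hemp]
    rw [List.isEmpty_iff] at hemp
    rw [hemp, show List.dropWhile PySem.Chars.isspace ['\n'] = [] from by decide]
  · rw [if_neg hemp]
    exact pv_rstrip_nl _

lemma pv_accum_toList (c : List String) :
    (pvAccum c).toList = (c.map (fun l => l.toList ++ ['\n'])).flatten := by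
  suffices h : ∀ (c : List String) (s : String),
      ((c.foldl (fun cc l => cc ++ l ++ "\n") s)).toList =
        s.toList ++ (c.map (fun l => l.toList ++ ['\n'])).flatten by
    simpa using h c ""
  intro c
  induction c with
  | nil => simp
  | cons x c ih =>
    intro s
    simp [ih, String.toList_append, show ("\n" : String).toList = ['\n'] from rfl]

lemma pv_flatten_join (cs : List (List Char)) (h : cs ≠ []) :
    (cs.map (· ++ ['\n'])).flatten = PySem.Chars.join ['\n'] cs ++ ['\n'] := by
  induction cs with
  | nil => simp at h
  | cons x cs ih =>
    cases cs with
    | nil => simp [PySem.Chars.join_singleton]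
    | cons y r =>
      rw [List.map_cons, List.flatten_cons, ih (by simp), PySem.Chars.join_cons_cons]
      simp

lemma pvFmtA_eq_pvFmtB (c : List String) : pvFmtA c = pvFmtB c := by
  unfold pvFmtA pvFmtB
  cases c with
  | nil => rfl
  | cons x c' =>
    simp only [PySem.Str.strip]
    congr 1
    rw [pv_accum_toList, PySem.Str.toList_join,
      show ("\n" : String).toList = ['\n'] from rfl]
    have hx : ((x :: c').map (fun l => l.toList ++ ['\n'])) =
        ((x :: c').map String.toList).map (· ++ ['\n']) := by
      simp [List.map_map]
    rw [hx, pv_flatten_join _ (by simp)]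
    exact pv_strip_nl _

-- ---------- A-side characterisation ----------

lemma pvDRegions_ne_nil (ls : List String) : pvDRegions ls ≠ [] := by
  cases ls with
  | nil => simp [pvDRegions]
  | cons l ls =>
    simp only [pvDRegions]
    split
    · simp
    · cases h : pvDRegions ls <;> simp

lemma pvStep_corr (slides : List (List String)) (st : List (List String) × Option (List String))
    (l : String) (hs : pvIsS l = false) (hstrip : PySem.Str.strip l = l) :
    pvStepA (slides, pvTriple st) l = (slides, pvTriple (pvChunkStep st l)) := by
  obtain ⟨d, oc⟩ := st
  have hs2 : PySem.Chars.startswith l.toList ['#','S','l','i','d','e',':'] = false := by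
    simpa [pvIsS] using hs
  by_cases hc : PySem.Chars.startswith l.toList ['#','C','o','n','t','e','n','t',':'] = true
  · cases oc <;> simp [pvStepA, pvChunkStep, pvTriple, hstrip, hs2, hc, pvFmtA]
  · have hc2 : PySem.Chars.startswith l.toList ['#','C','o','n','t','e','n','t',':'] = false := by
      simpa using hc
    cases oc <;> simp [pvStepA, pvChunkStep, pvTriple, hstrip, hs2, hc2, pvAccum_append]

lemma pvEmitAllSt_cons (st : List (List String) × Option (List String)) (l : String)
    (r : List String) (rest : List (List String)) :
    pvEmitAllSt st ((l :: r) :: rest) = pvEmitAllSt (pvChunkStep st l) (r :: rest) := by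
  cases rest <;> simp [pvEmitAllSt]

lemma pvA_char (ws : List String) (hstrip : ∀ l ∈ ws, PySem.Str.strip l = l)
    (slides : List (List String)) (st : List (List String) × Option (List String)) :
    pvFinish (ws.foldl pvStepA (slides, pvTriple st)) =
      slides ++ pvEmitAllSt st (pvDRegions ws) := by
  induction ws generalizing slides st with
  | nil =>
    obtain ⟨d, oc⟩ := st
    cases oc with
    | none =>
      by_cases hd : d = [] <;>
        simp [pvFinish, pvTriple, pvDRegions, pvEmitAllSt, pvFinEmit, hd]
    | some c => simp [pvFinish, pvTriple, pvDRegions, pvEmitAllSt, pvFinEmit, pvFmtA]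
  | cons l ls ih =>
    have hl := hstrip l (by simp)
    have hls : ∀ x ∈ ls, PySem.Str.strip x = x := fun x hx => hstrip x (by simp [hx])
    obtain ⟨r', rs', hrr⟩ : ∃ r' rs', pvDRegions ls = r' :: rs' := by
      cases h : pvDRegions ls with
      | nil => exact absurd h (pvDRegions_ne_nil ls)
      | cons a b => exact ⟨a, b, rfl⟩
    by_cases hS : pvIsS l
    · have hS2 : PySem.Chars.startswith l.toList ['#','S','l','i','d','e',':'] = true := by
        simpa [pvIsS] using hS
      have hstep : pvStepA (slides, pvTriple st) l =
          (slides ++ (pvMidEmit st).toList, pvTriple ([], none)) := by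
        obtain ⟨d, oc⟩ := st
        by_cases hd : d = [] <;> cases oc <;>
          simp [pvStepA, pvTriple, pvMidEmit, hl, hS2, hd, pvFmtA]
      rw [List.foldl_cons, hstep, ih hls _ ([], none)]
      have hreg : pvDRegions (l :: ls) = [] :: pvDRegions ls := by
        simp [pvDRegions, hS2]
      rw [hreg, hrr]
      simp [pvEmitAllSt, List.append_assoc]
    · have hS' : pvIsS l = false := by simpa using hS
      have hS2 : PySem.Chars.startswith l.toList ['#','S','l','i','d','e',':'] = false := by
        simpa [pvIsS] using hS'
      rw [List.foldl_cons, pvStep_corr slides st l hS' hl, ih hls slides (pvChunkStep st l)]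
      congr 1
      have hreg : pvDRegions (l :: ls) = (l :: r') :: rs' := by
        simp [pvDRegions, hS2, hrr]
      rw [hreg, pvEmitAllSt_cons, hrr]

-- ---------- B-side characterisation ----------

lemma pvRegionsB_aux (ls : List String) : ∀ done cur,
    (ls.foldl pvRegStep (done, cur)).1 ++ [(ls.foldl pvRegStep (done, cur)).2] =
      done ++ (match pvDRegions ls with | r :: rs => (cur ++ r) :: rs | [] => [cur]) := by
  induction ls with
  | nil => intro done cur; simp [pvDRegions]
  | cons l ls ih =>
    intro done cur
    obtain ⟨r', rs', hrr⟩ : ∃ r' rs', pvDRegions ls = r' :: rs' := by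
      cases h : pvDRegions ls with
      | nil => exact absurd h (pvDRegions_ne_nil ls)
      | cons a b => exact ⟨a, b, rfl⟩
    by_cases hS : PySem.Chars.startswith l.toList ['#','S','l','i','d','e',':'] = true
    · have hstep : (l :: ls).foldl pvRegStep (done, cur) = ls.foldl pvRegStep (done ++ [cur], []) := by
        simp [pvRegStep, hS]
      rw [hstep, ih]
      have hreg : pvDRegions (l :: ls) = [] :: pvDRegions ls := by
        simp [pvDRegions, hS]
      rw [hreg, hrr]
      simp
    · have hS2 : PySem.Chars.startswith l.toList ['#','S','l','i','d','e',':'] = false := by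
        simpa using hS
      have hstep : (l :: ls).foldl pvRegStep (done, cur) = ls.foldl pvRegStep (done, cur ++ [l]) := by
        simp [pvRegStep, hS2]
      rw [hstep, ih]
      have hreg : pvDRegions (l :: ls) = (l :: r') :: rs' := by
        simp [pvDRegions, hS2, hrr]
      rw [hreg, hrr]
      simp

lemma pvRegionsB_eq (ls : List String) : pvRegionsB ls = pvDRegions ls := by
  unfold pvRegionsB
  have h := pvRegionsB_aux ls [] []
  cases hr : pvDRegions ls with
  | nil => exact absurd hr (pvDRegions_ne_nil ls)
  | cons a b =>
    rw [hr] at h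
    simpa using h

lemma pvB_char (rs : List (List String)) (acc : List (List String)) :
    rs.foldl (fun slides region =>
      match pvSlideOf region with
      | some s => slides ++ [s]
      | none => slides) acc = acc ++ pvEmitB rs := by
  induction rs generalizing acc with
  | nil => simp [pvEmitB]
  | cons r rs ih =>
    simp only [List.foldl_cons, pvEmitB, List.flatMap_cons]
    cases h : pvSlideOf r <;> simp [h, ih, pvEmitB]

-- ---------- chunk counting and per-region agreement ----------

lemma pvChunk_some (r : List String) (d : List (List String)) (c : List String) :
    ∃ d' c', r.foldl pvChunkStep (d, some c) = (d', some c') ∧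
      d'.length = d.length + r.countP pvIsC := by
  induction r generalizing d c with
  | nil => exact ⟨d, c, rfl, by simp⟩
  | cons l r ih =>
    by_cases hc : PySem.Chars.startswith l.toList ['#','C','o','n','t','e','n','t',':'] = true
    · have hcl : pvIsC l = true := by simp [pvIsC, hc]
      obtain ⟨d', c', hf, hlen⟩ := ih (d ++ [c]) []
      refine ⟨d', c', ?_, ?_⟩
      · simp [pvChunkStep, hc, hf]
      · rw [hlen, List.countP_cons, hcl]; simp; omega
    · have hc2 : PySem.Chars.startswith l.toList ['#','C','o','n','t','e','n','t',':'] = false := by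
        simpa using hc
      have hcl : pvIsC l = false := by simp [pvIsC, hc2]
      obtain ⟨d', c', hf, hlen⟩ := ih d (c ++ [l])
      refine ⟨d', c', ?_, ?_⟩
      · simp [pvChunkStep, hc2, hf]
      · rw [hlen, List.countP_cons, hcl]; simp

lemma pvChunk_none (r : List String) :
    (r.foldl pvChunkStep ([], none) = ([], none) ∧ r.countP pvIsC = 0) ∨
    (∃ d c, r.foldl pvChunkStep ([], none) = (d, some c) ∧
      d.length + 1 = r.countP pvIsC) := by
  induction r with
  | nil => left; simp
  | cons l r ih =>
    by_cases hc : PySem.Chars.startswith l.toList ['#','C','o','n','t','e','n','t',':'] = true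
    · have hcl : pvIsC l = true := by simp [pvIsC, hc]
      right
      obtain ⟨d', c', hf, hlen⟩ := pvChunk_some r [] []
      refine ⟨d', c', ?_, ?_⟩
      · simp [pvChunkStep, hc, hf]
      · simp at hlen; rw [List.countP_cons, hcl]; simp; omega
    · have hc2 : PySem.Chars.startswith l.toList ['#','C','o','n','t','e','n','t',':'] = false := by
        simpa using hc
      have hcl : pvIsC l = false := by simp [pvIsC, hc2]
      rcases ih with ⟨h1, h2⟩ | ⟨d, c, hf, hlen⟩
      · left
        constructor
        · simp [pvChunkStep, hc2, h1]
        · rw [List.countP_cons, hcl]; simp [h2]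
      · right
        refine ⟨d, c, ?_, ?_⟩
        · simp [pvChunkStep, hc2, hf]
        · rw [List.countP_cons, hcl]; simp; omega

lemma pvSlideOf_eq_finEmit (r : List String) :
    pvSlideOf r = pvFinEmit (r.foldl pvChunkStep ([], none)) := by
  unfold pvSlideOf pvFinEmit
  have hfmt : (fun c => PySem.Str.strip (PySem.Str.join "\n" c)) = pvFmtA := by
    funext c; exact (pvFmtA_eq_pvFmtB c).symm
  cases hst : r.foldl pvChunkStep ([], none) with
  | mk d oc =>
    cases oc with
    | none => by_cases hd : d = [] <;> simp [hfmt, hd]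
    | some c => simp [hfmt]

lemma pvMid_eq_fin (r : List String) (h : r.countP pvIsC ≠ 1) :
    pvMidEmit (r.foldl pvChunkStep ([], none)) = pvFinEmit (r.foldl pvChunkStep ([], none)) := by
  rcases pvChunk_none r with ⟨h1, _⟩ | ⟨d, c, hf, hlen⟩
  · simp [h1, pvMidEmit, pvFinEmit]
  · have hd : d ≠ [] := by
      intro hd0; rw [hd0] at hlen; simp at hlen; omega
    simp [hf, pvMidEmit, pvFinEmit, hd]

lemma pvEmit_eq (rs : List (List String)) (hne : rs ≠ [])
    (h : ∀ r ∈ rs.dropLast, r.countP pvIsC ≠ 1) :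
    pvEmitAllSt ([], none) rs = pvEmitB rs := by
  induction rs with
  | nil => simp at hne
  | cons r rs ih =>
    cases rs with
    | nil => simp [pvEmitAllSt, pvEmitB, pvSlideOf_eq_finEmit]
    | cons s rs' =>
      have hr : r.countP pvIsC ≠ 1 := h r (by simp)
      have htl : ∀ x ∈ (s :: rs').dropLast, x.countP pvIsC ≠ 1 := by
        intro x hx
        exact h x (by simp [List.dropLast_cons₂, hx])
      rw [show pvEmitAllSt ([], none) (r :: s :: rs') =
          (pvMidEmit (r.foldl pvChunkStep ([], none))).toList ++
            pvEmitAllSt ([], none) (s :: rs') from rfl,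
        pvMid_eq_fin r hr, ← pvSlideOf_eq_finEmit, ih (by simp) htl]
      simp [pvEmitB]

-- ---------- assembling the ports ----------

lemma pvStepA_strip (st : List (List String) × List String × String × Bool) (l : String) :
    pvStepA st (PySem.Str.strip l) = pvStepA st l := by
  obtain ⟨slides, cur, cc, recb⟩ := st
  simp only [pvStepA, pvStrip_idem]

lemma pvA_full (text : String) :
    extract_contents_from_text text =
      pvEmitAllSt ([], none)
        (pvDRegions (((PySem.Str.split? (PySem.Str.strip text) "\n").getD []).map
          PySem.Str.strip)) := by
  have hA : extract_contents_from_text text =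
      pvFinish (((PySem.Str.split? (PySem.Str.strip text) "\n").getD []).foldl pvStepA
        ([], [], "", false)) := rfl
  have hfold : ∀ (lines : List String) (st : List (List String) × List String × String × Bool),
      (lines.map PySem.Str.strip).foldl pvStepA st = lines.foldl pvStepA st := by
    intro lines
    induction lines with
    | nil => intro st; rfl
    | cons x xs ih =>
      intro st
      simp only [List.map_cons, List.foldl_cons, pvStepA_strip, ih]
  have hstrip : ∀ l ∈ ((PySem.Str.split? (PySem.Str.strip text) "\n").getD []).map
      PySem.Str.strip, PySem.Str.strip l = l := by
    intro l hl
    obtain ⟨x, _, rfl⟩ := List.mem_map.mp hl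
    exact pvStrip_idem x
  rw [hA, ← hfold]
  simpa using pvA_char _ hstrip [] ([], none)

lemma pvB_full (text : String) :
    extract_contents_from_text_alt text =
      pvEmitB (pvDRegions (((PySem.Str.split? (PySem.Str.strip text) "\n").getD []).map
        PySem.Str.strip)) := by
  have hB : extract_contents_from_text_alt text =
      (pvRegionsB (((PySem.Str.split? (PySem.Str.strip text) "\n").getD []).map
        PySem.Str.strip)).foldl
        (fun slides region =>
          match pvSlideOf region with
          | some s => slides ++ [s]
          | none => slides) [] := rfl
  rw [hB, pvRegionsB_eq, pvB_char]
  simp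

lemma pvPorts_eq (text : String)
    (h : ∀ r ∈ (pvDRegions (((PySem.Str.split? (PySem.Str.strip text) "\n").getD []).map
        PySem.Str.strip)).dropLast,
      r.countP pvIsC ≠ 1) :
    extract_contents_from_text text = extract_contents_from_text_alt text := by
  rw [pvA_full, pvB_full]
  exact pvEmit_eq _ (pvDRegions_ne_nil _) h

-- ---------- the intended-difference direction (lengths) ----------

lemma pvMid_le (x : List (List String) × Option (List String)) :
    (pvMidEmit x).toList.length ≤ (pvFinEmit x).toList.length := by
  obtain ⟨d, oc⟩ := x
  by_cases hd : d = [] <;> cases oc <;> simp [pvMidEmit, pvFinEmit, hd]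

lemma pvMid_bad (r : List String) (h : r.countP pvIsC = 1) :
    pvMidEmit (r.foldl pvChunkStep ([], none)) = none ∧
      (pvFinEmit (r.foldl pvChunkStep ([], none))).toList.length = 1 := by
  rcases pvChunk_none r with ⟨h1, h2⟩ | ⟨d, c, hf, hlen⟩
  · rw [h] at h2; omega
  · have hd : d = [] := by
      rw [h] at hlen
      have : d.length = 0 := by omega
      exact List.length_eq_zero_iff.mp this
    subst hd
    simp [hf, pvMidEmit, pvFinEmit]

lemma pvEmitB_cons (r : List String) (rs : List (List String)) :
    pvEmitB (r :: rs) = (pvSlideOf r).toList ++ pvEmitB rs := by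
  simp [pvEmitB]

lemma pvLen_le (rs : List (List String)) :
    (pvEmitAllSt ([], none) rs).length ≤ (pvEmitB rs).length := by
  induction rs with
  | nil => simp [pvEmitAllSt, pvEmitB]
  | cons r rs ih =>
    cases rs with
    | nil => simp [pvEmitAllSt, pvEmitB, pvSlideOf_eq_finEmit]
    | cons s rs' =>
      have h1 := pvMid_le (r.foldl pvChunkStep ([], none))
      rw [show pvEmitAllSt ([], none) (r :: s :: rs') =
          (pvMidEmit (r.foldl pvChunkStep ([], none))).toList ++
            pvEmitAllSt ([], none) (s :: rs') from rfl,
        pvEmitB_cons, List.length_append, List.length_append,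
        pvSlideOf_eq_finEmit]
      omega

lemma pvLen_lt (rs : List (List String))
    (hbad : ∃ r ∈ rs.dropLast, r.countP pvIsC = 1) :
    (pvEmitAllSt ([], none) rs).length < (pvEmitB rs).length := by
  induction rs with
  | nil => simp at hbad
  | cons r rs ih =>
    cases rs with
    | nil => simp at hbad
    | cons s rs' =>
      rw [show pvEmitAllSt ([], none) (r :: s :: rs') =
          (pvMidEmit (r.foldl pvChunkStep ([], none))).toList ++
            pvEmitAllSt ([], none) (s :: rs') from rfl,
        pvEmitB_cons, List.length_append, List.length_append,
        pvSlideOf_eq_finEmit]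
      rw [List.dropLast_cons₂] at hbad
      obtain ⟨x, hx, hcx⟩ := hbad
      have htail_le := pvLen_le (s :: rs')
      rcases List.mem_cons.mp hx with rfl | hx'
      · obtain ⟨hmid, hfin⟩ := pvMid_bad x hcx
        rw [hmid, hfin]
        simp only [Option.toList_none, List.length_nil]
        omega
      · have hih := ih ⟨x, hx', hcx⟩
        have hmle := pvMid_le (r.foldl pvChunkStep ([], none))
        omega

-- ===== VERDICT (by name: the statement is the Claim_ definition above) =====
theorem extract_contents_from_text_spec : Claim_unchanged_extract_contents_from_text := by
  intro text _ hD
  apply pvPorts_eq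
  intro r hr hcount
  exact hD ⟨r, hr, hcount⟩

theorem extract_contents_from_text_changed : Claim_changed_extract_contents_from_text := by
  unfold Claim_changed_extract_contents_from_text; decide

theorem extract_contents_from_text_tight : Claim_exact_extract_contents_from_text := by
  intro text _ hD heq
  obtain ⟨r, hr, hc⟩ := hD
  have hlt := pvLen_lt _ ⟨r, hr, hc⟩
  rw [pvA_full, pvB_full] at heq
  have := congrArg List.length heq
  omega
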